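-- pv_equiv track=rewrite | github.com/JiaqiGe/ddsp | convert.py | build_seq
-- ===== SOURCE A (Python) =====
-- def itemset_format(eid, itemset):
--     return eid + ':' + ",".join(itemset)
--
-- def build_seq(sid, sequence):
--     result = []
--     if len(sequence) == 0:
--         return ';'.join(result)
--
--     eid = sequence[0][0]
--     itemset = []
--
--     for item in sequence:
--         if item[0] == eid:
--             itemset.append(item[1])
--         else:
--             result.append(itemset_format(eid, itemset))
--             itemset = []
--             eid = item[0]
--             itemset.append(item[1])
--     result.append(itemset_format(eid, itemset))
--     return ';'.join(result)
-- ===== SOURCE B (Python) =====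
-- def build_seq(sid, sequence):
--     if not sequence:
--         return ''
--     parts = [sequence[0][0], ':', sequence[0][1]]
--     for (prev_eid, _), (eid, item) in zip(sequence, sequence[1:]):
--         parts.append(',' + item if eid == prev_eid else ';' + eid + ':' + item)
--     return ''.join(parts)
-- ===== Notes on version B (the rewrite author's own statement) =====
-- stated objective: alternative
-- what changed: Instead of grouping items into runs (eid/itemset accumulators with a final flush and two joins), B never forms groups at all: it zips the sequence with its own tail and emits one separator-prefixed fragment per adjacent pair (',' on equal event ids, ';eid:' on a change), concatenating everything in a single join.
import Mathlib
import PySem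

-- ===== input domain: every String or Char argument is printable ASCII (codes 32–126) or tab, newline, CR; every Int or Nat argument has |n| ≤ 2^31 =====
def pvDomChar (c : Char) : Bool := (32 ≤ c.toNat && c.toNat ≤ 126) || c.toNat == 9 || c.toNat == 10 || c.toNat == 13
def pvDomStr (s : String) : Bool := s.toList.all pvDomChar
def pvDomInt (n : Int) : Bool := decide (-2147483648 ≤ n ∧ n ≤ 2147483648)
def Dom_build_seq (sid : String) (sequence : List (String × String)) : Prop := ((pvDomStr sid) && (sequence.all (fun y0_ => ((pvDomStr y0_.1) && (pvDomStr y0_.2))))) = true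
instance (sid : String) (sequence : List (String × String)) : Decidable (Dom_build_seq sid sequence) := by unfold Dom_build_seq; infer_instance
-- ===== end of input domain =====

-- B drops A's run-grouping (eid/itemset accumulators + final flush) entirely: it zips the
-- sequence with its tail and emits one separator fragment per adjacent pair; alternative
-- decomposition, same O(n) cost; return value only (no observable mutation).

-- ===== PORT A =====
def itemset_format (eid : String) (itemset : List String) : String :=
  eid ++ ":" ++ PySem.Str.join "," itemset

-- the for-loop of A over (result, eid, itemset), final flush included
def build_seq_loop (result : List String) (eid : String) (itemset : List String) :
    List (String × String) → List String
  | [] => result ++ [itemset_format eid itemset]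
  | item :: rest =>
    if item.1 == eid then
      build_seq_loop result eid (itemset ++ [item.2]) rest
    else
      build_seq_loop (result ++ [itemset_format eid itemset]) item.1 [item.2] rest

def build_seq (sid : String) (sequence : List (String × String)) : String :=
  match sequence with
  | [] => PySem.Str.join ";" []
  | hd :: _ => PySem.Str.join ";" (build_seq_loop [] hd.1 [] sequence)

-- ===== PORT B =====
-- the separator-prefixed fragment for one adjacent pair (prev item, current item)
def pair_frag (pq : (String × String) × (String × String)) : String :=
  if pq.2.1 == pq.1.1 then "," ++ pq.2.2 else ";" ++ pq.2.1 ++ ":" ++ pq.2.2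

def build_seq_alt (sid : String) (sequence : List (String × String)) : String :=
  match sequence with
  | [] => ""
  | (k0, v0) :: tl =>
    PySem.Str.join "" ([k0, ":", v0] ++ (sequence.zip tl).map pair_frag)

-- ===== PRECONDITION & SPEC =====
def Spec_build_seq (sid : String) (sequence : List (String × String)) (out : String) : Prop := out = build_seq_alt sid sequence
instance (sid : String) (sequence : List (String × String)) (out : String) : Decidable (Spec_build_seq sid sequence out) := by unfold Spec_build_seq; infer_instance

-- ===== CLAIM (what is proved, stated in full; the proofs are below) =====
def Claim_equal_build_seq : Prop := ∀ (sid : String) (sequence : List (String × String)), Dom_build_seq sid sequence → Spec_build_seq sid sequence (build_seq sid sequence)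

-- ===== LEMMAS AND PROOFS =====

-- string the remaining items contribute after an item with event id `prev`
def tailStr (prev : String) : List (String × String) → String
  | [] => ""
  | (k, v) :: rest =>
    (if k == prev then "," ++ v else ";" ++ k ++ ":" ++ v) ++ tailStr k rest

theorem chars_join_append_singleton (sep y : List Char) (x : List Char) (xs : List (List Char)) :
    PySem.Chars.join sep ((x :: xs) ++ [y]) =
      PySem.Chars.join sep (x :: xs) ++ sep ++ y := by
  induction xs generalizing x with
  | nil => simp [PySem.Chars.join_cons_cons, PySem.Chars.join_singleton]
  | cons x' xs' ih =>
    simp only [List.cons_append, PySem.Chars.join_cons_cons]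
    rw [show x' :: (xs' ++ [y]) = (x' :: xs') ++ [y] from rfl, ih x']
    simp [List.append_assoc]

theorem join_append_singleton (sep y : String) (xs : List String) (h : xs ≠ []) :
    PySem.Str.join sep (xs ++ [y]) = PySem.Str.join sep xs ++ sep ++ y := by
  obtain ⟨x, xs', rfl⟩ := List.exists_cons_of_ne_nil h
  rw [← String.toList_inj]
  simp only [PySem.Str.toList_join, List.map_append, List.map_cons, List.map_nil,
    String.toList_append]
  rw [chars_join_append_singleton]

theorem join_singleton_str (x : String) : PySem.Str.join ";" [x] = x := by
  rw [← String.toList_inj]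
  simp [PySem.Str.toList_join, PySem.Chars.join_singleton]

theorem join_append_cat (sep y z : String) (xs : List String) :
    PySem.Str.join sep (xs ++ [y ++ z]) = PySem.Str.join sep (xs ++ [y]) ++ z := by
  cases xs with
  | nil =>
    rw [← String.toList_inj]
    simp [PySem.Str.toList_join, PySem.Chars.join_singleton]
  | cons x xs' =>
    rw [join_append_singleton sep (y ++ z) _ (by simp),
        join_append_singleton sep y _ (by simp)]
    simp [String.append_assoc]

theorem join_empty_cons (x : String) (xs : List String) :
    PySem.Str.join "" (x :: xs) = x ++ PySem.Str.join "" xs := by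
  cases xs with
  | nil =>
    rw [← String.toList_inj]
    simp [PySem.Str.toList_join, PySem.Chars.join_singleton, PySem.Chars.join_nil]
  | cons x' xs' =>
    rw [← String.toList_inj]
    simp [PySem.Str.toList_join, PySem.Chars.join_cons_cons]

theorem fmt_snoc (eid v : String) (itemset : List String) (h : itemset ≠ []) :
    itemset_format eid (itemset ++ [v]) = itemset_format eid itemset ++ ("," ++ v) := by
  unfold itemset_format
  rw [join_append_singleton "," v itemset h]
  simp [String.append_assoc]

theorem fmt_singleton (k v : String) :
    itemset_format k [v] = k ++ ":" ++ v := by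
  unfold itemset_format
  rw [← String.toList_inj]
  simp [PySem.Str.toList_join, PySem.Chars.join_singleton]

theorem loop_join (seq : List (String × String)) :
    ∀ (result : List String) (eid : String) (itemset : List String), itemset ≠ [] →
      PySem.Str.join ";" (build_seq_loop result eid itemset seq) =
        PySem.Str.join ";" (result ++ [itemset_format eid itemset]) ++ tailStr eid seq := by
  induction seq with
  | nil => intro result eid itemset _; simp [build_seq_loop, tailStr]
  | cons item rest ih =>
    intro result eid itemset hne
    obtain ⟨k, v⟩ := item
    by_cases h : (k == eid) = true
    · have hk : k = eid := by simpa using h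
      simp only [build_seq_loop, h, if_true]
      rw [ih result eid (itemset ++ [v]) (by simp),
          fmt_snoc eid v itemset hne, join_append_cat]
      simp [tailStr, hk, String.append_assoc]
    · have h' : (k == eid) = false := by simpa using h
      simp only [build_seq_loop, h', Bool.false_eq_true, if_false]
      rw [ih (result ++ [itemset_format eid itemset]) k [v] (by simp),
          join_append_singleton ";" (itemset_format k [v]) _ (by simp),
          fmt_singleton]
      simp [tailStr, h', String.append_assoc]

theorem zip_frag (rest : List (String × String)) :
    ∀ (p : String × String),
      PySem.Str.join "" (((p :: rest).zip rest).map pair_frag) = tailStr p.1 rest := by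
  induction rest with
  | nil =>
    intro p
    rw [← String.toList_inj]
    simp [PySem.Str.toList_join, PySem.Chars.join_nil, tailStr]
  | cons q rest' ih =>
    intro p
    obtain ⟨k, v⟩ := q
    simp only [List.zip_cons_cons, List.map_cons]
    rw [join_empty_cons, ih (k, v)]
    simp [pair_frag, tailStr, String.append_assoc]

-- ===== VERDICT (by name: the statement is the Claim_ definition above) =====
theorem build_seq_spec : Claim_equal_build_seq := by
  intro sid sequence _
  unfold Spec_build_seq build_seq build_seq_alt
  match sequence with
  | [] =>
    rw [← String.toList_inj]
    simp [PySem.Str.toList_join, PySem.Chars.join_nil]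
  | (k0, v0) :: rest =>
    simp only [build_seq_loop, beq_self_eq_true, if_true, List.nil_append]
    rw [loop_join rest [] k0 [v0] (by simp), List.nil_append,
        join_singleton_str, fmt_singleton]
    rw [show ([k0, ":", v0] : List String) ++ (((k0, v0) :: rest).zip rest).map pair_frag
          = k0 :: ":" :: v0 :: (((k0, v0) :: rest).zip rest).map pair_frag from rfl,
        join_empty_cons, join_empty_cons, join_empty_cons, zip_frag rest (k0, v0)]
    simp [String.append_assoc]
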